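-- pv_equiv track=rewrite | github.com/LCA-ActivityBrowser/activity-browser | activity_browser/app/ui/tables/parameters.py | clean_parameter_name
-- ===== SOURCE A (Python) =====
-- def clean_parameter_name(param_name: str) -> str:
--     """ Takes a given parameter name and remove or replace all characters
--     not allowed to be in there.
--
--     These are ' -,.%[]' and all integers
--     """
--     remove = ",.%[]0123456789"
--     replace = " -"
--     for char in remove:
--         if char in param_name:
--             param_name = param_name.replace(char, "")
--     for char in replace:
--         if char in param_name:
--             param_name = param_name.replace(char, "_")
--
--     return param_name
-- ===== SOURCE B (Python) =====
-- def clean_parameter_name(param_name: str) -> str: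
--     """Single pass over the input: drop removed chars, map ' ' and '-' to '_'."""
--     out = []
--     for char in param_name:
--         if char in ",.%[]0123456789":
--             continue
--         out.append("_" if char in " -" else char)
--     return "".join(out)
-- ===== Notes on version B (the rewrite author's own statement) =====
-- stated objective: simpler
-- what changed: Replaced A's fourteen alphabet-driven full-string .replace passes by one input-driven pass that classifies each character (drop / '_' / keep) and joins the result.
import Mathlib
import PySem

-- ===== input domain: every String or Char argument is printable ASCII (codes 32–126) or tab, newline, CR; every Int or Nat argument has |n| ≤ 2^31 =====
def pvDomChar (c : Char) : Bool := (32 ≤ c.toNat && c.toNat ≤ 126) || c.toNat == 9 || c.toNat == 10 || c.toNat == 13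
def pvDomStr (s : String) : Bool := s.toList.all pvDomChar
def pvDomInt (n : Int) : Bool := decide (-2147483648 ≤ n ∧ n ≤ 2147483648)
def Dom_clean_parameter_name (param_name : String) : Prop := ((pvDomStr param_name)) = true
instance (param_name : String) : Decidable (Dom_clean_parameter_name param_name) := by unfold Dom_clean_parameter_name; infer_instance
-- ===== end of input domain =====

-- B replaces A's fourteen full-string .replace passes by one input-driven pass
-- classifying each character (drop / '_' / keep); objective: simpler.


-- ===== PORT A =====
def clean_parameter_name (param_name : String) : String :=
  let s1 := (",.%[]0123456789" : String).toList.foldl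
    (fun s ch => if PySem.Str.isIn (String.ofList [ch]) s then PySem.Str.replace s (String.ofList [ch]) "" else s)
    param_name
  (" -" : String).toList.foldl
    (fun s ch => if PySem.Str.isIn (String.ofList [ch]) s then PySem.Str.replace s (String.ofList [ch]) "_" else s)
    s1

-- ===== PORT B =====
def clean_parameter_name_alt (param_name : String) : String :=
  String.ofList (param_name.toList.foldl
    (fun out ch =>
      if PySem.Str.isIn (String.ofList [ch]) ",.%[]0123456789" then out
      else out ++ [if PySem.Str.isIn (String.ofList [ch]) " -" then '_' else ch]) [])

-- ===== PRECONDITION & SPEC =====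
def Spec_clean_parameter_name (param_name : String) (out : String) : Prop := out = clean_parameter_name_alt param_name
instance (param_name : String) (out : String) : Decidable (Spec_clean_parameter_name param_name out) := by unfold Spec_clean_parameter_name; infer_instance

-- ===== CLAIM (what is proved, stated in full; the proofs are below) =====
def Claim_equal_clean_parameter_name : Prop := ∀ (param_name : String), Dom_clean_parameter_name param_name → Spec_clean_parameter_name param_name (clean_parameter_name param_name)

-- ===== LEMMAS AND PROOFS =====

theorem pv_infix_singleton (c : Char) (l : List Char) : [c] <:+: l ↔ c ∈ l := by
  constructor
  · intro h
    exact List.singleton_sublist.mp h.sublist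
  · intro h
    obtain ⟨s, t, rfl⟩ := List.append_of_mem h
    exact ⟨s, t, by simp⟩

theorem pv_isIn_single (c : Char) (s : String) :
    PySem.Str.isIn (String.ofList [c]) s = s.toList.contains c := by
  rw [Bool.eq_iff_iff, PySem.Str.isIn_iff_infix]
  simp [pv_infix_singleton]

theorem pv_go_single (c : Char) (new : List Char) :
    ∀ (l acc : List Char) (fuel : Nat), l.length ≤ fuel →
    PySem.Chars.replace.go [c] new fuel l acc
      = acc.reverse ++ l.flatMap (fun x => if x = c then new else [x]) := by
  intro l
  induction l with
  | nil =>
    intro acc fuel _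
    cases fuel <;> simp [PySem.Chars.replace.go]
  | cons h t ih =>
    intro acc fuel hf
    cases fuel with
    | zero => simp at hf
    | succ n =>
      rw [PySem.Chars.replace.go]
      by_cases hc : h = c
      · subst hc
        simp only [List.isPrefixOf, beq_self_eq_true, Bool.true_and, if_pos, List.length_cons,
          List.length_nil, Nat.zero_add, List.drop_succ_cons, List.drop_zero]
        rw [ih (new.reverse ++ acc) n (by simp at hf; omega)]
        simp
      · have hp : [c].isPrefixOf (h :: t) = false := by
          simp [List.isPrefixOf]; exact fun e => absurd e.symm hc
        rw [hp]
        simp only [Bool.false_eq_true, if_false]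
        rw [ih (h :: acc) n (by simp at hf; omega)]
        simp [hc]

theorem pv_replace_single (s : String) (c : Char) (new : String) :
    (PySem.Str.replace s (String.ofList [c]) new).toList
      = s.toList.flatMap (fun x => if x = c then new.toList else [x]) := by
  simp only [PySem.Str.replace, PySem.Chars.replace, String.toList_ofList]
  rw [if_neg (by simp), pv_go_single c new.toList s.toList [] s.toList.length le_rfl]
  simp

theorem pv_flatMap_del (c : Char) (l : List Char) :
    l.flatMap (fun x => if x = c then ([] : List Char) else [x])
      = l.filter (fun x => !(x == c)) := by
  induction l with
  | nil => simp
  | cons h t ih =>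
    by_cases hc : h = c <;> simp [hc, ih]

theorem pv_flatMap_sub (c d : Char) (l : List Char) :
    l.flatMap (fun x => if x = c then [d] else [x])
      = l.map (fun x => if x = c then d else x) := by
  induction l with
  | nil => simp
  | cons h t ih =>
    by_cases hc : h = c <;> simp [hc, ih]

theorem pv_stepR (c : Char) (s : String) :
    ((if PySem.Str.isIn (String.ofList [c]) s then PySem.Str.replace s (String.ofList [c]) "" else s)).toList
      = s.toList.filter (fun x => !(x == c)) := by
  by_cases h : PySem.Str.isIn (String.ofList [c]) s = true
  · rw [if_pos h, pv_replace_single]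
    simpa using pv_flatMap_del c s.toList
  · rw [if_neg h]
    have hmem : c ∉ s.toList := by
      rw [pv_isIn_single] at h
      simpa using h
    rw [List.filter_eq_self.mpr]
    intro a ha
    simp only [Bool.not_eq_eq_eq_not, Bool.not_true, beq_eq_false_iff_ne, ne_eq]
    exact fun e => hmem (e ▸ ha)

theorem pv_stepM (c : Char) (s : String) :
    ((if PySem.Str.isIn (String.ofList [c]) s then PySem.Str.replace s (String.ofList [c]) "_" else s)).toList
      = s.toList.map (fun x => if x = c then '_' else x) := by
  by_cases h : PySem.Str.isIn (String.ofList [c]) s = true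
  · rw [if_pos h, pv_replace_single]
    simpa using pv_flatMap_sub c '_' s.toList
  · rw [if_neg h]
    have hmem : c ∉ s.toList := by
      rw [pv_isIn_single] at h
      simpa using h
    rw [List.map_congr_left (g := id), List.map_id]
    intro a ha
    have hne : a ≠ c := fun e => hmem (e ▸ ha)
    simp only [id]
    rw [if_neg hne]

-- the remove phase of A's pipeline collapses to one filter
theorem pv_removePhase : ∀ (cs : List Char) (s : String),
    ((cs.foldl (fun s ch => if PySem.Str.isIn (String.ofList [ch]) s then PySem.Str.replace s (String.ofList [ch]) "" else s) s)).toList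
      = s.toList.filter (fun x => !(cs.contains x)) := by
  intro cs
  induction cs with
  | nil => simp
  | cons c cs ih =>
    intro s
    rw [List.foldl_cons, ih, pv_stepR, List.filter_filter]
    apply List.filter_congr
    intro a _
    simp only [List.contains_cons, Bool.not_or]
    rw [Bool.and_comm]

-- the replace phase collapses to one map, as long as '_' is not itself substituted later
theorem pv_replacePhase : ∀ (cs : List Char), '_' ∉ cs → ∀ (s : String),
    ((cs.foldl (fun s ch => if PySem.Str.isIn (String.ofList [ch]) s then PySem.Str.replace s (String.ofList [ch]) "_" else s) s)).toList
      = s.toList.map (fun x => if cs.contains x then '_' else x) := by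
  intro cs
  induction cs with
  | nil =>
    intro _ s
    simp
  | cons c cs ih =>
    intro hu s
    rw [List.foldl_cons, ih (fun h => hu (List.mem_cons_of_mem _ h)), pv_stepM, List.map_map]
    apply List.map_congr_left
    intro a _
    simp only [Function.comp, List.contains_cons]
    by_cases hc : a = c
    · subst hc
      rw [if_pos rfl]
      rw [if_neg (by simpa using fun h => hu (List.mem_cons_of_mem _ (List.mem_of_elem_eq_true h)))]
      simp
    · rw [if_neg hc]
      by_cases hm : cs.contains a = true <;> simp [hc]

-- B's loop collapses to filter-then-map
theorem pv_foldB : ∀ (l acc : List Char),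
    (l.foldl (fun out ch =>
        if PySem.Str.isIn (String.ofList [ch]) ",.%[]0123456789" then out
        else out ++ [if PySem.Str.isIn (String.ofList [ch]) " -" then '_' else ch]) acc)
      = acc ++ (l.filter (fun ch => !((",.%[]0123456789" : String).toList.contains ch))).map
          (fun ch => if (" -" : String).toList.contains ch then '_' else ch) := by
  intro l
  induction l with
  | nil => simp
  | cons h t ih =>
    intro acc
    rw [List.foldl_cons]
    by_cases hr : PySem.Str.isIn (String.ofList [h]) ",.%[]0123456789" = true
    · have hc : (",.%[]0123456789" : String).toList.contains h = true := by
        rw [← pv_isIn_single]; exact hr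
      rw [if_pos hr, ih, List.filter_cons_of_neg (by simp only [hc, Bool.not_true, Bool.false_eq_true, not_false_eq_true])]
    · have hc : (",.%[]0123456789" : String).toList.contains h = false := by
        rw [← pv_isIn_single]; simpa using hr
      rw [if_neg hr, ih, List.filter_cons_of_pos (by simp only [hc, Bool.not_false]), List.map_cons,
        pv_isIn_single, List.append_assoc, List.singleton_append]

theorem pv_main (p : String) :
    clean_parameter_name p = clean_parameter_name_alt p := by
  have hrp : (" -" : String).toList = [' ', '-'] := by decide
  have hu : '_' ∉ (" -" : String).toList := by decide
  have hA : (clean_parameter_name p).toList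
      = (p.toList.filter (fun x => !((",.%[]0123456789" : String).toList.contains x))).map
          (fun x => if (" -" : String).toList.contains x then '_' else x) := by
    unfold clean_parameter_name
    rw [pv_replacePhase _ hu, pv_removePhase]
  have hB := pv_foldB p.toList []
  have : (clean_parameter_name p).toList = (clean_parameter_name_alt p).toList := by
    rw [hA]
    unfold clean_parameter_name_alt
    rw [String.toList_ofList, hB, List.nil_append, hrp]
    simp
  calc clean_parameter_name p
      = String.ofList (clean_parameter_name p).toList := by rw [String.ofList_toList]
    _ = String.ofList (clean_parameter_name_alt p).toList := by rw [this]
    _ = clean_parameter_name_alt p := by rw [String.ofList_toList]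

-- ===== VERDICT (by name: the statement is the Claim_ definition above) =====
theorem clean_parameter_name_spec : Claim_equal_clean_parameter_name := by
  intro p _
  exact pv_main p
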